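-- pv_equiv track=rewrite | github.com/nbratek/WDI | zestaw 4 /zad18.py | f
-- ===== SOURCE A (Python) =====
-- def f(T):
--     n = len(T)
--     max_suma = 0
--     for i in range(n):
--         k = 0
--         w = 0
--         for j in range(n):
--             w += T[i][j]
--             k += T[j][i]
--             if j > 9:
--                 w -= T[i][j -10]
--                 k -= T[j - 10][i]
--             if w > max_suma:
--                 max_suma = w
--             if k > max_suma:
--                 max_suma = k
--     return max_suma
-- ===== SOURCE B (Python) =====
-- def f(T):
--     n = len(T)
--     best = 0
--     for i in range(n):
--         row = [T[i][j] for j in range(n)]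
--         col = [T[j][i] for j in range(n)]
--         for line in (row, col):
--             P = [0]
--             for x in line:
--                 P.append(P[-1] + x)
--             for j in range(n):
--                 s = P[j + 1] - P[max(0, j - 9)]
--                 if s > best:
--                     best = s
--     return best
-- ===== Notes on version B (the rewrite author's own statement) =====
-- stated objective: alternative
-- what changed: Replaces the interleaved running-window sums (one decremented accumulator per direction inside the shared loop) by precomputed prefix-sum arrays for each row and column, indexing P[j+1]-P[max(0,j-9)] and scanning the row's windows and the column's windows in two separate passes.
import Mathlib
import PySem

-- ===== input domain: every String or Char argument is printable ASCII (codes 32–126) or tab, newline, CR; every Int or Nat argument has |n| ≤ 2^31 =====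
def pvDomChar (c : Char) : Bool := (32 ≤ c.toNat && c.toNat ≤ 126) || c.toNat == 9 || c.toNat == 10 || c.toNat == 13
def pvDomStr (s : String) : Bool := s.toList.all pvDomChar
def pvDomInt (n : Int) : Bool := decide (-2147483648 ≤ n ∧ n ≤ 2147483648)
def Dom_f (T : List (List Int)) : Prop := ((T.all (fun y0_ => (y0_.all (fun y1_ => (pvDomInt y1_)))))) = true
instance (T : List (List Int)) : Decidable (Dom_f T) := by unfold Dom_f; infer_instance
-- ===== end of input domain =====

-- B replaces A's two interleaved running window sums by precomputed prefix-sum arrays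
-- per row and per column (two separate scan passes); same asymptotic cost, different bookkeeping.

-- ===== PORT A =====
-- A-side helper: the body of A's inner loop, statement for statement
def pvStepA (T : List (List Int)) (i : Int) (st : Int × Int × Int) (j : Int) : Int × Int × Int :=
  let k := st.1
  let w := st.2.1
  let m := st.2.2
  let w := w + PySem.List.pyGetD (PySem.List.pyGetD T i []) j 0
  let k := k + PySem.List.pyGetD (PySem.List.pyGetD T j []) i 0
  let w := if j > 9 then w - PySem.List.pyGetD (PySem.List.pyGetD T i []) (j - 10) 0 else w
  let k := if j > 9 then k - PySem.List.pyGetD (PySem.List.pyGetD T (j - 10) []) i 0 else k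
  let m := if w > m then w else m
  let m := if k > m then k else m
  (k, w, m)

def f (T : List (List Int)) : Int :=
  let n : Int := PySem.List.len T
  (PySem.List.pyRange 0 n 1).foldl (fun max_suma i =>
    ((PySem.List.pyRange 0 n 1).foldl (pvStepA T i) ((0 : Int), (0 : Int), max_suma)).2.2) 0

-- ===== PORT B =====
-- B-side helpers: one prefix-append step, and one window-maximum step
def pvPrefStep (P : List Int) (x : Int) : List Int :=
  P ++ [PySem.List.pyGetD P (-1) 0 + x]

def pvWinStep (P : List Int) (best j : Int) : Int :=
  let s := PySem.List.pyGetD P (j + 1) 0 - PySem.List.pyGetD P (max 0 (j - 9)) 0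
  if s > best then s else best

def f_alt (T : List (List Int)) : Int :=
  let n : Int := PySem.List.len T
  (PySem.List.pyRange 0 n 1).foldl (fun best i =>
    let row := (PySem.List.pyRange 0 n 1).map (fun j => PySem.List.pyGetD (PySem.List.pyGetD T i []) j 0)
    let col := (PySem.List.pyRange 0 n 1).map (fun j => PySem.List.pyGetD (PySem.List.pyGetD T j []) i 0)
    [row, col].foldl (fun best line =>
      let P := line.foldl pvPrefStep [(0 : Int)]
      (PySem.List.pyRange 0 n 1).foldl (pvWinStep P) best) best) 0

-- ===== PRECONDITION & SPEC =====
-- Pre_f: every row has at least len(T) entries — exactly the inputs on which Python A's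
-- T[i][j]/T[j][i] indexing never raises IndexError (B's identical accesses raise there too).
def Pre_f (T : List (List Int)) : Prop := ∀ row ∈ T, T.length ≤ row.length
instance (T : List (List Int)) : Decidable (Pre_f T) := by unfold Pre_f; infer_instance
def pvWitness_f : List (List Int) := [[1, -2], [3, 4]]

def Spec_f (T : List (List Int)) (out : Int) : Prop := out = f_alt T
instance (T : List (List Int)) (out : Int) : Decidable (Spec_f T out) := by unfold Spec_f; infer_instance

-- ===== CLAIM (what is proved, stated in full; the proofs are below) =====
def Claim_equal_f : Prop := ∀ (T : List (List Int)), Dom_f T → Pre_f T → Spec_f T (f T)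

-- ===== LEMMAS AND PROOFS =====

-- prefix sums and window sums (windows of width ≤ 10; Nat subtraction truncates at 0)
def pvPref (L : List Int) (j : Nat) : Int := (L.take j).sum
def pvWin (L : List Int) (j : Nat) : Int := pvPref L (j + 1) - pvPref L (j + 1 - 10)

-- the first n entries of row i / column i, as lists
def pvRowL (T : List (List Int)) (nn i : Nat) : List Int :=
  (List.range nn).map (fun t => (T.getD i []).getD t 0)
def pvColL (T : List (List Int)) (nn i : Nat) : List Int :=
  (List.range nn).map (fun t => (T.getD t []).getD i 0)

-- A's inner-loop body, on Nat indices and abstract row/column lists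
def pvStepN (row col : List Int) (st : Int × Int × Int) (j : Nat) : Int × Int × Int :=
  ((if j > 9 then st.1 + col.getD j 0 - col.getD (j - 10) 0 else st.1 + col.getD j 0),
   (if j > 9 then st.2.1 + row.getD j 0 - row.getD (j - 10) 0 else st.2.1 + row.getD j 0),
   max (max st.2.2 (if j > 9 then st.2.1 + row.getD j 0 - row.getD (j - 10) 0 else st.2.1 + row.getD j 0))
       (if j > 9 then st.1 + col.getD j 0 - col.getD (j - 10) 0 else st.1 + col.getD j 0))

theorem ite_gt_eq_max (a b : Int) : (if b > a then b else a) = max a b := by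
  rw [max_def]; split_ifs <;> omega

theorem pvPref_succ (L : List Int) (j : Nat) : pvPref L (j + 1) = pvPref L j + L.getD j 0 := by
  unfold pvPref
  induction L generalizing j with
  | nil => simp
  | cons x xs ih =>
    cases j with
    | zero => simp
    | succ j => simp only [List.take_succ_cons, List.sum_cons, List.getD_cons_succ, ih j]; ring

theorem pv_run_eq_win (L : List Int) (n : Nat) :
    (if n > 9 then (pvPref L n - pvPref L (n - 10)) + L.getD n 0 - L.getD (n - 10) 0
     else (pvPref L n - pvPref L (n - 10)) + L.getD n 0) = pvWin L n := by
  unfold pvWin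
  rw [pvPref_succ]
  by_cases h : n > 9
  · have h10 : n - 10 + 1 = n + 1 - 10 := by omega
    rw [if_pos h, ← h10, pvPref_succ]; ring
  · have h1 : n - 10 = 0 := by omega
    have h2 : n + 1 - 10 = 0 := by omega
    rw [if_neg h, h1, h2]; ring

-- A's inner loop: invariant for the running sums and the running max
theorem innerA_eq (row col : List Int) (m0 : Int) (n : Nat) :
    (List.range n).foldl (pvStepN row col) ((0 : Int), (0 : Int), m0)
    = (pvPref col n - pvPref col (n - 10), pvPref row n - pvPref row (n - 10),
        (List.range n).foldl (fun m j => max (max m (pvWin row j)) (pvWin col j)) m0) := by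
  induction n with
  | zero => simp [pvPref]
  | succ n ih =>
    rw [List.range_succ, List.foldl_append, List.foldl_append, ih]
    simp only [List.foldl_cons, List.foldl_nil, pvStepN, Prod.mk.injEq]
    refine ⟨pv_run_eq_win col n, pv_run_eq_win row n, ?_⟩
    rw [pv_run_eq_win col n, pv_run_eq_win row n]

-- hoisting a max out of a running-max fold
theorem foldl_max_hoist (c : Nat → Int) (l : List Nat) (x : Int) :
    ∀ y, l.foldl (fun m j => max m (c j)) (max x y) = max x (l.foldl (fun m j => max m (c j)) y) := by
  induction l with
  | nil => intro y; rfl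
  | cons j l ih =>
    intro y
    simp only [List.foldl_cons, max_assoc]
    exact ih (max y (c j))

-- one interleaved max pass = two consecutive max passes
theorem foldl_max_split (a b : Nat → Int) (l : List Nat) :
    ∀ m, l.foldl (fun m j => max (max m (a j)) (b j)) m
      = l.foldl (fun m j => max m (b j)) (l.foldl (fun m j => max m (a j)) m) := by
  induction l with
  | nil => intro m; rfl
  | cons j l ih =>
    intro m
    simp only [List.foldl_cons]
    rw [ih (max (max m (a j)) (b j))]
    congr 1
    rw [max_comm (max m (a j)) (b j), foldl_max_hoist, max_comm]

-- B's prefix-list loop builds exactly the table of prefix sums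
theorem prefList_eq (L : List Int) :
    L.foldl pvPrefStep [(0 : Int)] = (List.range (L.length + 1)).map (pvPref L) := by
  induction L using List.reverseRecOn with
  | nil => simp [pvPref]
  | append_singleton M x ih =>
    rw [List.foldl_append, ih]
    simp only [List.foldl_cons, List.foldl_nil, pvPrefStep]
    have hlast : PySem.List.pyGetD ((List.range (M.length + 1)).map (pvPref M)) (-1) 0
        = pvPref M M.length := by
      rw [List.range_succ, List.map_append, List.map_cons, List.map_nil]
      exact PySem.List.pyGetD_neg_one_append_singleton _ _ _
    have key : (List.range ((M ++ [x]).length + 1)).map (pvPref (M ++ [x]))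
        = (List.range (M.length + 1)).map (pvPref M) ++ [pvPref M M.length + x] := by
      have hlen : (M ++ [x]).length + 1 = (M.length + 1) + 1 := by simp
      rw [hlen, List.range_succ, List.map_append]
      congr 1
      · refine List.map_eq_map_iff.mpr (fun j hj => ?_)
        have hjle : j ≤ M.length := by
          have := List.mem_range.mp hj; omega
        unfold pvPref
        rw [List.take_append_of_le_length hjle]
      · unfold pvPref
        simp [List.take_of_length_le, List.sum_append]
    rw [key, hlast]

-- A's inner loop over Int indices = the abstract interleaved max pass
theorem A_side (T : List (List Int)) (nn i : Nat) (m : Int) :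
    ((PySem.List.pyRange 0 (nn : Int) 1).foldl (pvStepA T (i : Int)) ((0 : Int), (0 : Int), m)).2.2
    = (List.range nn).foldl
        (fun m j => max (max m (pvWin (pvRowL T nn i) j)) (pvWin (pvColL T nn i) j)) m := by
  rw [PySem.List.pyRange_zero_natCast, List.foldl_map]
  rw [PySem.List.foldl_congr_mem _ _ (pvStepN (pvRowL T nn i) (pvColL T nn i)) _ ?_]
  · rw [innerA_eq]
  · intro st j hjm
    have hj : j < nn := List.mem_range.mp hjm
    have hrj : (pvRowL T nn i).getD j 0 = (T.getD i []).getD j 0 := by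
      unfold pvRowL; exact PySem.List.getD_map_range _ _ _ _ hj
    have hcj : (pvColL T nn i).getD j 0 = (T.getD j []).getD i 0 := by
      unfold pvColL; exact PySem.List.getD_map_range _ _ _ _ hj
    by_cases h9 : 9 < j
    · have hc : (9 : Int) < (j : Int) := by exact_mod_cast h9
      have hsub : ((j : Int) - 10) = ((j - 10 : Nat) : Int) := by omega
      have hrj10 : (pvRowL T nn i).getD (j - 10) 0 = (T.getD i []).getD (j - 10) 0 := by
        unfold pvRowL; exact PySem.List.getD_map_range _ _ _ _ (by omega)
      have hcj10 : (pvColL T nn i).getD (j - 10) 0 = (T.getD (j - 10) []).getD i 0 := by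
        unfold pvColL; exact PySem.List.getD_map_range _ _ _ _ (by omega)
      simp only [pvStepA, pvStepN, hsub, PySem.List.pyGetD_natCast, gt_iff_lt, if_pos hc,
        if_pos h9, ite_gt_eq_max, hrj, hcj, hrj10, hcj10]
    · have hc : ¬ ((9 : Int) < (j : Int)) := by exact_mod_cast h9
      simp only [pvStepA, pvStepN, PySem.List.pyGetD_natCast, gt_iff_lt, if_neg hc, if_neg h9,
        ite_gt_eq_max, hrj, hcj]

-- B's inner pass over a prefix table = the abstract single-direction max pass
theorem B_pass (L : List Int) (n : Nat) (hL : L.length = n) (b : Int) :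
    (PySem.List.pyRange 0 (n : Int) 1).foldl (pvWinStep (L.foldl pvPrefStep [(0 : Int)])) b
    = (List.range n).foldl (fun b j => max b (pvWin L j)) b := by
  have hpl : L.foldl pvPrefStep [(0 : Int)] = (List.range (n + 1)).map (pvPref L) := by
    rw [← hL]; exact prefList_eq L
  rw [hpl, PySem.List.pyRange_zero_natCast, List.foldl_map]
  refine PySem.List.foldl_congr_mem _ _ _ _ ?_
  intro best j hjm
  have hj : j < n := List.mem_range.mp hjm
  have h1 : ((j : Int) + 1) = ((j + 1 : Nat) : Int) := by omega
  have h2 : max 0 ((j : Int) - 9) = ((j + 1 - 10 : Nat) : Int) := by omega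
  have g1 : ((List.range (n + 1)).map (pvPref L)).getD (j + 1) 0 = pvPref L (j + 1) :=
    PySem.List.getD_map_range _ _ _ _ (by omega)
  have g2 : ((List.range (n + 1)).map (pvPref L)).getD (j + 1 - 10) 0 = pvPref L (j + 1 - 10) :=
    PySem.List.getD_map_range _ _ _ _ (by omega)
  simp only [pvWinStep, h1, h2, PySem.List.pyGetD_natCast, g1, g2, ite_gt_eq_max, pvWin]

theorem f_eq_f_alt (T : List (List Int)) : f T = f_alt T := by
  unfold f f_alt
  simp only [PySem.List.len_eq]
  refine PySem.List.foldl_congr_mem _ _ _ _ ?_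
  intro m i hi
  obtain ⟨h0, hlt⟩ := PySem.List.mem_pyRange_one.mp hi
  have hiN : i = ((i.toNat : Nat) : Int) := by omega
  rw [hiN]
  have hrow : (PySem.List.pyRange 0 ((T.length : Nat) : Int) 1).map
      (fun j => PySem.List.pyGetD (PySem.List.pyGetD T ((i.toNat : Nat) : Int) []) j 0)
      = pvRowL T T.length i.toNat := by
    rw [PySem.List.pyRange_zero_natCast, List.map_map]
    unfold pvRowL
    refine List.map_eq_map_iff.mpr (fun j _ => ?_)
    simp only [Function.comp_apply, PySem.List.pyGetD_natCast]
  have hcol : (PySem.List.pyRange 0 ((T.length : Nat) : Int) 1).map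
      (fun j => PySem.List.pyGetD (PySem.List.pyGetD T j []) ((i.toNat : Nat) : Int) 0)
      = pvColL T T.length i.toNat := by
    rw [PySem.List.pyRange_zero_natCast, List.map_map]
    unfold pvColL
    refine List.map_eq_map_iff.mpr (fun j _ => ?_)
    simp only [Function.comp_apply, PySem.List.pyGetD_natCast]
  rw [A_side T T.length i.toNat m]
  simp only [List.foldl_cons, List.foldl_nil, hrow, hcol]
  rw [B_pass (pvRowL T T.length i.toNat) T.length (by simp [pvRowL]) m,
      B_pass (pvColL T T.length i.toNat) T.length (by simp [pvColL])]
  exact foldl_max_split _ _ _ m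

-- ===== VERDICT (by name: the statement is the Claim_ definition above) =====
theorem f_spec : Claim_equal_f := by
  intro T _ _
  unfold Spec_f
  exact f_eq_f_alt T
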